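-- pv_equiv track=rewrite | github.com/mko3000/tira | tira_vk1/sequence.py | generate
-- ===== SOURCE A (Python) =====
-- def generate(n):
--     counter = 1
--     no = 0
--     while counter <= n:
--         no += 1
--         for i in str(no):
--             if str(no).count(i)>1:
--                 counter += 1
--                 break
--     return no
-- ===== SOURCE B (Python) =====
-- def generate(n):
--     if n <= 0:
--         return 0
--     # pref[x] = how many of 1..x have a repeated digit, materialized lazily
--     pref = [0]
--
--     def pref_upto(x):
--         while len(pref) <= x:
--             k = len(pref)
--             s = str(k)
--             pref.append(pref[-1] + (1 if len(set(s)) < len(s) else 0))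
--         return pref[x]
--
--     hi = 1
--     while pref_upto(hi) < n:
--         hi *= 2
--     lo = 1
--     while lo < hi:
--         mid = (lo + hi) // 2
--         if pref_upto(mid) >= n:
--             hi = mid
--         else:
--             lo = mid + 1
--     return lo
-- ===== Notes on version B (the rewrite author's own statement) =====
-- stated objective: alternative
-- what changed: B replaces A's incremental scan with a running counter by binary search (with exponential doubling for the upper bound) over a lazily materialized cumulative table pref[x] = count of repeated-digit numbers in 1..x, testing membership per number via len(set(str(k))) < len(str(k)).
import Mathlib
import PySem

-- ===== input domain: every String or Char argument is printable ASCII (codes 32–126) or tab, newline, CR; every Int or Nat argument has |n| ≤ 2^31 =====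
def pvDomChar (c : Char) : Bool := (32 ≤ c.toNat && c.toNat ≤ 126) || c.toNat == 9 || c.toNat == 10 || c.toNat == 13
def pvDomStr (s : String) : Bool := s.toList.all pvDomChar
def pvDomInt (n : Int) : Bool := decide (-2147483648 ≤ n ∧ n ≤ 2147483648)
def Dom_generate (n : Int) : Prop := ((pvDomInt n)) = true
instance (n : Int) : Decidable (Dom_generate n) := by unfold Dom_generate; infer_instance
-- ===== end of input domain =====

-- B replaces A's incremental scan (advance no, keep a running counter of repeated-digit numbers)
-- by exponential doubling plus binary search for the least x whose monotone prefix count of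
-- repeated-digit numbers reaches n (objective: alternative; no speed claim).

-- ===== PORT A =====
-- A's repeated-digit test, as A writes it: some character of str(no) occurs more than once.
def strRep (no : Nat) : Bool :=
  (PySem.Int.toStr (no : Int)).toList.any
    (fun c => decide (1 < PySem.Str.count (PySem.Int.toStr (no : Int)) (String.singleton c)))

-- A's `while counter <= n` loop. `fuel` is only a totality guard: the loop runs exactly
-- `generate n` iterations, and the answer is at most 10^10 + n.toNat (every natural ≥ 10^10 has a
-- repeated digit), so on the stated Int domain the fuel is never exhausted; the zero-fuel leg is dead code.
def generateLoop (fuel : Nat) (n counter : Int) (no : Nat) : Int :=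
  match fuel with
  | 0 => (no : Int)
  | f + 1 =>
    if counter ≤ n then
      if strRep (no + 1) then generateLoop f n (counter + 1) (no + 1)
      else generateLoop f n counter (no + 1)
    else (no : Int)

def generate (n : Int) : Int := generateLoop (10 ^ 10 + n.toNat) n 1 0

-- ===== PORT B =====
-- Source B's repeated-digit test: len(set(s)) < len(s) for s = str(k).
def repB (k : Int) : Bool :=
  decide (PySem.Set.len (PySem.Set.ofList (PySem.Int.toStr k).toList) < PySem.Str.len (PySem.Int.toStr k))

-- Source B's pref_upto(x): extend the lazy cumulative table `pref` (pref[x] = how many of 1..x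
-- have a repeated digit) while len(pref) <= x, then read pref[x].
def prefUpto (pref : List Int) (x : Int) : List Int × Int :=
  if _h : (pref.length : Int) ≤ x then
    prefUpto (pref ++ [PySem.List.pyGetD pref (-1) 0 +
      (if repB (pref.length : Int) then 1 else 0)]) x
  else (pref, PySem.List.pyGetD pref x 0)
termination_by (x + 1 - pref.length).toNat
decreasing_by simp only [List.length_append, List.length_cons, List.length_nil]; omega

-- Source B's `while pref_upto(hi) < n: hi *= 2` loop, threading the table. `fuel` is only a totality
-- guard: starting from hi = 1, 64 doublings reach 2^64 > 10^10 + n on the stated Int domain, past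
-- the answer, so the loop always stops before the fuel runs out; the zero-fuel leg is dead code.
def dblLoop (fuel : Nat) (n hi : Int) (pref : List Int) : List Int × Int :=
  match fuel with
  | 0 => (pref, hi)
  | f + 1 =>
    let r := prefUpto pref hi
    if r.2 < n then dblLoop f n (hi * 2) r.1 else (r.1, hi)

-- Source B's `while lo < hi` binary-search loop, threading the table.
def bsLoop (n lo hi : Int) (pref : List Int) : Int :=
  if h : lo < hi then
    let mid := PySem.Int.floordiv (lo + hi) 2
    let r := prefUpto pref mid
    if n ≤ r.2 then bsLoop n lo mid r.1 else bsLoop n (mid + 1) hi r.1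
  else lo
termination_by (hi - lo).toNat
decreasing_by
  · have h2 := PySem.Int.floordiv_two_mid_bounds (le_of_lt h)
    rw [PySem.Int.floordiv_eq_ediv_of_pos (by norm_num)] at h2 ⊢
    omega
  · have h2 := PySem.Int.floordiv_two_mid_bounds (le_of_lt h)
    rw [PySem.Int.floordiv_eq_ediv_of_pos (by norm_num)] at h2 ⊢
    omega

def generate_alt (n : Int) : Int :=
  if n ≤ 0 then 0
  else
    let r := dblLoop 64 n 1 [0]
    bsLoop n 1 r.2 r.1

-- ===== PRECONDITION & SPEC =====
def Spec_generate (n : Int) (out : Int) : Prop := out = generate_alt n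
instance (n : Int) (out : Int) : Decidable (Spec_generate n out) := by unfold Spec_generate; infer_instance

-- ===== CLAIM (what is proved, stated in full; the proofs are below) =====
def Claim_equal_generate : Prop := ∀ (n : Int), Dom_generate n → Spec_generate n (generate n)

-- ===== LEMMAS AND PROOFS =====

-- The common mathematical content: P k = "k has a repeated decimal digit",
-- Rc x = how many of 1..x have a repeated digit.
def pvP (k : Nat) : Bool := !decide (Nat.digits 10 k).Nodup
def pvRc (x : Nat) : Nat := (List.range' 1 x).countP pvP

theorem pvRc_zero : pvRc 0 = 0 := rfl

theorem pvRc_succ (x : Nat) :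
    pvRc (x + 1) = pvRc x + if pvP (x + 1) then 1 else 0 := by
  unfold pvRc
  rw [List.range'_1_concat, List.countP_append]
  simp [Nat.add_comm 1 x, List.countP_cons]

theorem pvRc_mono {a b : Nat} (h : a ≤ b) : pvRc a ≤ pvRc b := by
  unfold pvRc
  have : List.range' 1 a ++ List.range' (1 + a) (b - a) = List.range' 1 b := by
    rw [List.range'_append_1]; congr 1; omega
  rw [← this, List.countP_append]
  omega

-- A-side string facts: str(no).count(c) and the characters of str(no).
theorem pv_count_go_singleton (c : Char) (fuel : Nat) (s : List Char) (acc : Nat)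
    (h : s.length ≤ fuel) : PySem.Chars.count.go [c] fuel s acc = acc + s.count c := by
  induction fuel generalizing s acc with
  | zero =>
    have : s = [] := by cases s <;> simp_all
    subst this; simp [PySem.Chars.count.go]
  | succ f ih =>
    cases s with
    | nil => simp [PySem.Chars.count.go]
    | cons hd t =>
      simp only [PySem.Chars.count.go]
      by_cases hc : hd = c
      · subst hc
        rw [if_pos (by simp [List.isPrefixOf])]
        simp only [List.length_cons] at h
        rw [List.length_singleton, List.drop_one, List.tail_cons,
          ih t (acc + 1) (by omega)]
        simp
        omega
      · rw [if_neg (by simp [List.isPrefixOf]; exact fun he => hc he.symm)]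
        simp only [List.length_cons] at h
        rw [ih t acc (by omega)]
        simp [hc]

theorem pv_count_singleton (s : List Char) (c : Char) :
    PySem.Chars.count s [c] = s.count c := by
  unfold PySem.Chars.count
  rw [if_neg (by simp)]
  simpa using pv_count_go_singleton c s.length s 0 le_rfl

theorem pv_any_count_eq_nodup (l : List Char) :
    (l.any fun c => decide (1 < l.count c)) = !decide l.Nodup := by
  by_cases h : l.Nodup
  · simp only [h, decide_true, Bool.not_true]
    rw [List.any_eq_false]
    intro c _
    simp only [decide_eq_true_eq, not_lt]
    exact (List.nodup_iff_count_le_one.mp h) c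
  · simp only [h, decide_false, Bool.not_false]
    rw [List.any_eq_true]
    rw [List.nodup_iff_count_le_one] at h
    push_neg at h
    obtain ⟨c, hc⟩ := h
    exact ⟨c, List.count_pos_iff.mp (by omega), by simpa using hc⟩

theorem pv_toDigitsCore_eq (fuel m : Nat) (acc : List Char) (hm : 0 < m) (h : m ≤ fuel) :
    Nat.toDigitsCore 10 fuel m acc = ((Nat.digits 10 m).map Nat.digitChar).reverse ++ acc := by
  induction fuel generalizing m acc with
  | zero => omega
  | succ f ih =>
    rw [Nat.toDigitsCore]
    rw [Nat.digits_def' (by norm_num : (1:Nat) < 10) hm]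
    by_cases h0 : m / 10 = 0
    · rw [if_pos h0, h0]
      simp
    · rw [if_neg h0]
      rw [ih (m / 10) _ (Nat.pos_of_ne_zero h0) (by
        have := Nat.div_lt_self hm (by norm_num : (1:Nat) < 10); omega)]
      simp

theorem pv_toDigits_eq (m : Nat) (hm : 0 < m) :
    Nat.toDigits 10 m = ((Nat.digits 10 m).map Nat.digitChar).reverse := by
  unfold Nat.toDigits
  simpa using pv_toDigitsCore_eq (m + 1) m [] hm (by omega)

theorem pv_chars_eq (m : Nat) (hm : 0 < m) :
    (PySem.Int.toStr ((m : Nat) : Int)).toList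
      = ((Nat.digits 10 m).map Nat.digitChar).reverse := by
  rw [PySem.Int.toList_toStr]
  unfold PySem.Int.toChars
  rw [if_neg (by simp)]
  simp only [Int.toNat_natCast]
  exact pv_toDigits_eq m hm

theorem pv_digitChar_nodup (l : List Nat) (hl : ∀ d ∈ l, d < 10) :
    (l.map Nat.digitChar).Nodup ↔ l.Nodup := by
  constructor
  · exact List.Nodup.of_map _
  · intro h
    refine List.Nodup.map_on ?_ h
    have key : ∀ x < 10, ∀ y < 10, Nat.digitChar x = Nat.digitChar y → x = y := by decide
    intro x hx y hy hxy
    exact key x (hl x hx) y (hl y hy) hxy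

-- A's per-number test computes pvP.
theorem strRep_eq (m : Nat) (hm : 0 < m) : strRep m = pvP m := by
  unfold strRep pvP
  have hcnt : ∀ c, PySem.Str.count (PySem.Int.toStr ((m : Nat) : Int)) (String.singleton c)
      = ((PySem.Int.toStr ((m : Nat) : Int)).toList).count c := by
    intro c
    rw [PySem.Str.count_eq]
    have hs : (String.singleton c).toList = [c] := String.toList_singleton c
    rw [hs]
    exact pv_count_singleton _ c
  calc (PySem.Int.toStr ((m : Nat) : Int)).toList.any
        (fun c => decide (1 < PySem.Str.count (PySem.Int.toStr ((m : Nat) : Int)) (String.singleton c)))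
      = (PySem.Int.toStr ((m : Nat) : Int)).toList.any
        (fun c => decide (1 < ((PySem.Int.toStr ((m : Nat) : Int)).toList).count c)) := by
        exact List.any_congr rfl (fun c => by rw [hcnt c])
    _ = !decide ((PySem.Int.toStr ((m : Nat) : Int)).toList).Nodup :=
        pv_any_count_eq_nodup _
    _ = !decide (Nat.digits 10 m).Nodup := by
        rw [pv_chars_eq m hm]
        congr 1
        rw [decide_eq_decide, List.nodup_reverse]
        exact pv_digitChar_nodup _ (fun d hd => Nat.digits_lt_base (by norm_num) hd)

-- |set(l)| < |l| iff l has a duplicate.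
theorem pv_set_len_lt (l : List Char) :
    decide (PySem.Set.len (PySem.Set.ofList l) < (l.length : Int)) = !decide l.Nodup := by
  have hlen : PySem.Set.len (PySem.Set.ofList l) = ((PySem.Set.ofList l).length : Int) := rfl
  have hcard : (PySem.Set.ofList l).length = l.toFinset.card := by
    have hfin : (PySem.Set.ofList l).toFinset = l.toFinset := by
      ext a; simp [PySem.Set.mem_ofList]
    rw [← hfin]
    exact (List.toFinset_card_of_nodup (PySem.Set.nodup_ofList l)).symm
  by_cases h : l.Nodup
  · have he := List.toFinset_card_of_nodup h
    simp only [h, decide_true, Bool.not_true, decide_eq_false_iff_not, not_lt, hlen, hcard]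
    omega
  · have hlt : l.toFinset.card < l.length := by
      rw [List.card_toFinset]
      have hs := List.dedup_sublist l
      have hle := hs.length_le
      rcases Nat.lt_or_ge l.dedup.length l.length with hl | hg
      · exact hl
      · exact absurd (List.dedup_eq_self.mp (hs.eq_of_length (by omega))) h
    simp only [h, decide_false, Bool.not_false, decide_eq_true_eq, hlen, hcard]
    omega

-- B's per-number test computes pvP.
theorem repB_eq (k : Int) (hk : 1 ≤ k) : repB k = pvP k.toNat := by
  obtain ⟨m, hm⟩ : ∃ m : Nat, k = (m : Int) := ⟨k.toNat, by omega⟩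
  subst hm
  unfold repB pvP
  rw [PySem.Str.len_eq, pv_set_len_lt, pv_chars_eq m (by exact_mod_cast hk)]
  rw [Int.toNat_natCast]
  congr 1
  rw [decide_eq_decide, List.nodup_reverse]
  exact pv_digitChar_nodup _ (fun d hd => Nat.digits_lt_base (by norm_num) hd)

-- The table invariant: pref is exactly the cumulative counts pvRc 0 .. pvRc (L-1).
def pvInv (pref : List Int) : Prop :=
  ∃ L : Nat, 1 ≤ L ∧ pref = (List.range L).map (fun i => (pvRc i : Int))

theorem pv_last_of_map (L : Nat) (hL : 1 ≤ L) (f : Nat → Int) :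
    PySem.List.pyGetD ((List.range L).map f) (-1) 0 = f (L - 1) := by
  simp only [PySem.List.pyGetD, PySem.List.pyGet?, PySem.List.pyIdx?, List.length_map,
    List.length_range]
  norm_num
  rw [if_pos hL]
  simp only [Option.bind_some]
  rw [List.getElem?_range (by omega)]
  rfl

-- pref_upto maintains the table invariant and returns pvRc x.
theorem prefUpto_spec (x : Int) (hx : 0 ≤ x) :
    ∀ pref, pvInv pref → pvInv (prefUpto pref x).1 ∧ (prefUpto pref x).2 = (pvRc x.toNat : Int) := by
  intro pref
  induction pref using prefUpto.induct (x := x) with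
  | case1 pref h ih =>
    intro hinv
    obtain ⟨L, hL1, hL⟩ := hinv
    rw [prefUpto, dif_pos h]
    refine ih ⟨L + 1, by omega, ?_⟩
    subst hL
    rw [List.range_succ, List.map_append]
    congr 1
    simp only [List.map_cons, List.map_nil, List.cons.injEq, and_true]
    rw [pv_last_of_map L hL1]
    have hrb : repB ((((List.range L).map (fun i => (pvRc i : Int))).length : Nat) : Int)
        = pvP L := by
      have hre := repB_eq ((L : Nat) : Int) (by exact_mod_cast hL1)
      simp only [List.length_map, List.length_range]
      rw [hre, Int.toNat_natCast]
    simp only [List.length_map, List.length_range] at hrb ⊢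
    rw [hrb]
    have hLs : L = (L - 1) + 1 := by omega
    rw [hLs, pvRc_succ, ← hLs]
    by_cases hp : pvP L = true
    · rw [hp]; simp
    · rw [Bool.eq_false_iff.mpr hp]; simp
  | case2 pref h =>
    intro hinv
    obtain ⟨L, hL1, hL⟩ := hinv
    rw [prefUpto, dif_neg h]
    refine ⟨⟨L, hL1, hL⟩, ?_⟩
    subst hL
    simp only [List.length_map, List.length_range] at h
    have hxL : x.toNat < L := by omega
    rw [PySem.List.pyGetD_eq_getElem _ _ hx (by simp; omega)]
    rw [List.getElem_map, List.getElem_range]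

-- pigeonhole: every natural >= 10^10 has a repeated digit.
theorem pvP_big (k : Nat) (h : 10 ^ 10 ≤ k) : pvP k = true := by
  unfold pvP
  simp only [Bool.not_eq_true', decide_eq_false_iff_not]
  intro hnd
  have hlen : (Nat.digits 10 k).length ≤ 10 := by
    have h1 := List.toFinset_card_of_nodup hnd
    have h2 : (Nat.digits 10 k).toFinset ⊆ Finset.range 10 := by
      intro d hd
      simp only [List.mem_toFinset] at hd
      exact Finset.mem_range.mpr (Nat.digits_lt_base (by norm_num) hd)
    have h3 := Finset.card_le_card h2
    simp only [Finset.card_range] at h3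
    omega
  have hk : k < 10 ^ (Nat.digits 10 k).length :=
    Nat.lt_base_pow_length_digits (by norm_num)
  have : (10 : Nat) ^ (Nat.digits 10 k).length ≤ 10 ^ 10 :=
    Nat.pow_le_pow_right (by norm_num) hlen
  omega

theorem pvRc_big (m : Nat) : m ≤ pvRc (10 ^ 10 + m) := by
  induction m with
  | zero => exact Nat.zero_le _
  | succ j ih =>
    have h : 10 ^ 10 + (j + 1) = (10 ^ 10 + j) + 1 := by omega
    rw [h, pvRc_succ, pvP_big _ (by omega)]
    simp
    omega

-- A's loop computes the least x with pvRc x >= n, given the invariant counter = 1 + pvRc no.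
theorem pv_A_loop (n : Int) (T : Nat) (hT1 : n ≤ (pvRc T : Int))
    (hT2 : ∀ y : Nat, y < T → (pvRc y : Int) < n) :
    ∀ fuel no, no ≤ T → T - no ≤ fuel →
      generateLoop fuel n (1 + (pvRc no : Int)) no = (T : Int) := by
  intro fuel
  induction fuel with
  | zero =>
    intro no h1 h2
    have : no = T := by omega
    subst this
    rfl
  | succ f ih =>
    intro no h1 h2
    by_cases hlt : no < T
    · have hcnt : (pvRc no : Int) < n := hT2 no hlt
      show generateLoop (f + 1) n (1 + (pvRc no : Int)) no = (T : Int)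
      rw [generateLoop, if_pos (by omega), strRep_eq (no + 1) (Nat.succ_pos no)]
      by_cases hp : pvP (no + 1) = true
      · rw [if_pos hp]
        have hR : (1 + (pvRc no : Int)) + 1 = 1 + (pvRc (no + 1) : Int) := by
          rw [pvRc_succ, hp]
          simp
          push_cast
          ring
        rw [hR]
        exact ih (no + 1) (by omega) (by omega)
      · rw [if_neg hp]
        have hR : (1 + (pvRc no : Int)) = 1 + (pvRc (no + 1) : Int) := by
          rw [pvRc_succ, Bool.eq_false_iff.mpr hp]
          simp
        rw [hR]
        exact ih (no + 1) (by omega) (by omega)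
    · have : no = T := by omega
      subst this
      rw [generateLoop, if_neg (by omega)]

-- B's doubling loop stops at some hi with count_rep(hi) >= n.
theorem pv_dbl (n : Int) (T : Nat) (hT1 : n ≤ (pvRc T : Int)) :
    ∀ fuel hi pref, pvInv pref → 1 ≤ hi → (T : Int) ≤ hi * 2 ^ fuel →
      pvInv (dblLoop fuel n hi pref).1 ∧ 1 ≤ (dblLoop fuel n hi pref).2 ∧
        n ≤ (pvRc (dblLoop fuel n hi pref).2.toNat : Int) := by
  intro fuel
  induction fuel with
  | zero =>
    intro hi pref hinv h1 h2
    simp only [pow_zero, mul_one] at h2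
    refine ⟨hinv, h1, ?_⟩
    show n ≤ (pvRc hi.toNat : Int)
    have hmono : pvRc T ≤ pvRc hi.toNat := pvRc_mono (by omega)
    omega
  | succ f ih =>
    intro hi pref hinv h1 h2
    obtain ⟨hinv', hval⟩ := prefUpto_spec hi (by omega) pref hinv
    show (let r := prefUpto pref hi;
      pvInv (if r.2 < n then dblLoop f n (hi * 2) r.1 else (r.1, hi)).1 ∧
      1 ≤ (if r.2 < n then dblLoop f n (hi * 2) r.1 else (r.1, hi)).2 ∧
      n ≤ (pvRc (if r.2 < n then dblLoop f n (hi * 2) r.1 else (r.1, hi)).2.toNat : Int))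
    by_cases hc : (prefUpto pref hi).2 < n
    · simp only [if_pos hc]
      refine ih (hi * 2) _ hinv' (by omega) ?_
      have hpow : hi * 2 * 2 ^ f = hi * 2 ^ (f + 1) := by ring
      rw [hpow]
      exact h2
    · simp only [if_neg hc]
      exact ⟨hinv', h1, by rw [hval] at hc; omega⟩

-- B's binary search finds the least x with pvRc x >= n.
theorem pv_bs (n : Int) (T : Nat) (hT1 : n ≤ (pvRc T : Int))
    (hT2 : ∀ y : Nat, y < T → (pvRc y : Int) < n) :
    ∀ d lo hi pref, pvInv pref → (hi - lo).toNat ≤ d → 1 ≤ lo → lo ≤ (T : Int) → (T : Int) ≤ hi →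
      bsLoop n lo hi pref = (T : Int) := by
  intro d
  induction d with
  | zero =>
    intro lo hi pref hinv hd h1 h2 h3
    rw [bsLoop, dif_neg (by omega : ¬ lo < hi)]
    omega
  | succ d ih =>
    intro lo hi pref hinv hd h1 h2 h3
    rw [bsLoop]
    by_cases h : lo < hi
    · simp only [dif_pos h]
      have hfd : PySem.Int.floordiv (lo + hi) 2 = (lo + hi) / 2 :=
        PySem.Int.floordiv_eq_ediv_of_pos (by norm_num)
      rw [hfd]
      have hmidlo : lo ≤ (lo + hi) / 2 := by omega
      have hmidhi : (lo + hi) / 2 < hi := by omega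
      obtain ⟨hinv', hval⟩ := prefUpto_spec ((lo + hi) / 2) (by omega) pref hinv
      by_cases hc : n ≤ (prefUpto pref ((lo + hi) / 2)).2
      · rw [if_pos hc]
        rw [hval] at hc
        have hTm : (T : Int) ≤ (lo + hi) / 2 := by
          by_contra hx
          have hy : ((lo + hi) / 2).toNat < T := by omega
          have := hT2 _ hy
          omega
        exact ih lo ((lo + hi) / 2) _ hinv' (by omega) h1 h2 hTm
      · rw [if_neg hc]
        rw [hval] at hc
        have hTm : (lo + hi) / 2 + 1 ≤ (T : Int) := by
          by_contra hx
          have hy : T ≤ ((lo + hi) / 2).toNat := by omega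
          have := pvRc_mono hy
          omega
        exact ih ((lo + hi) / 2 + 1) hi _ hinv' (by omega) (by omega) hTm h3
    · rw [dif_neg h]
      omega

-- ===== VERDICT (by name: the statement is the Claim_ definition above) =====
theorem generate_spec : Claim_equal_generate := by
  unfold Claim_equal_generate
  intro n hdom
  unfold Spec_generate
  simp only [Dom_generate, pvDomInt, decide_eq_true_eq] at hdom
  by_cases hn : n ≤ 0
  · have hfuel : 10 ^ 10 + n.toNat = (10 ^ 10 + n.toNat - 1) + 1 := by
      have : (0:Nat) < 10 ^ 10 := by norm_num
      omega
    unfold generate generate_alt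
    rw [if_pos hn, hfuel, generateLoop, if_neg (by omega)]
    rfl
  · have hn1 : 1 ≤ n := by omega
    have hkey : n ≤ (pvRc (10 ^ 10 + n.toNat) : Int) := by
      have := pvRc_big n.toNat
      omega
    have hEx : ∃ x : Nat, n ≤ (pvRc x : Int) := ⟨_, hkey⟩
    set T := Nat.find hEx with hTdef
    have hT1 : n ≤ (pvRc T : Int) := Nat.find_spec hEx
    have hT2 : ∀ y : Nat, y < T → (pvRc y : Int) < n := by
      intro y hy
      have := Nat.find_min hEx hy
      omega
    have hTb : T ≤ 10 ^ 10 + n.toNat := Nat.find_min' hEx hkey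
    have hT1' : 1 ≤ T := by
      by_contra hx
      have : T = 0 := by omega
      rw [this] at hT1
      rw [pvRc_zero] at hT1
      omega
    have hA : generate n = (T : Int) := by
      unfold generate
      have h0 : (1 : Int) + (pvRc 0 : Int) = 1 := by rw [pvRc_zero]; rfl
      have := pv_A_loop n T hT1 hT2 (10 ^ 10 + n.toNat) 0 (Nat.zero_le T) (by omega)
      rw [h0] at this
      exact this
    have hB : generate_alt n = (T : Int) := by
      unfold generate_alt
      rw [if_neg hn]
      have hinv0 : pvInv [0] := ⟨1, le_rfl, by simp [pvRc_zero]⟩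
      have hdbl := pv_dbl n T hT1 64 1 [0] hinv0 le_rfl (by
        have hb : (T : Int) ≤ 10 ^ 10 + (n.toNat : Int) := by
          exact_mod_cast Nat.cast_le.mpr hTb
        have hnn : (n.toNat : Int) ≤ 2147483648 := by omega
        norm_num
        omega)
      obtain ⟨hinv', hh1, hh2⟩ := hdbl
      set r := dblLoop 64 n 1 [0] with hr
      have hTh : (T : Int) ≤ r.2 := by
        by_contra hx
        have hy : r.2.toNat < T := by omega
        have := hT2 _ hy
        omega
      exact pv_bs n T hT1 hT2 (r.2 - 1).toNat 1 r.2 r.1 hinv' (by omega) le_rfl (by omega) hTh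
    rw [hA, hB]
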